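-- pv_equiv track=rewrite | github.com/pysv/djep | pyconde/helpers/templatetags/helper_tags.py | shy
-- ===== SOURCE A (Python) =====
-- def shy(value, max_length=None):
--     """
--     Inserts &shy; elements in over-long strings.
--     """
--     if not max_length:
--         return value
--     result = []
--     for word in value.split():
--         if len(word) > max_length:
--             # Split the word into chunks not larger than max_length
--             nw = [word[i:i+max_length] for i in range(0, len(word), max_length)]
--             result.append(u"&shy;".join(nw))
--         else:
--             result.append(word)
--     return u" ".join(result)
-- ===== SOURCE B (Python) =====
-- def shy(value, max_length=None):
--     """
--     Inserts &shy; elements in over-long strings.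
--
--     Single pass over the characters: no split()/slicing; a counter tracks the
--     length of the current word and a pending flag delays the separating space.
--     """
--     if not max_length:
--         return value
--     out = []
--     cnt = 0
--     pending = False
--     for ch in value:
--         if ch.isspace():
--             if cnt > 0:
--                 pending = True
--             cnt = 0
--         else:
--             if pending:
--                 out.append(u" ")
--                 pending = False
--             if cnt == max_length:
--                 out.append(u"&shy;")
--                 cnt = 0
--             out.append(ch)
--             cnt += 1
--     return u"".join(out)
-- ===== Notes on version B (the rewrite author's own statement) =====
-- stated objective: alternative
-- what changed: Replaces split()+per-word chunk slicing and two joins by a single pass over the characters that inserts the soft-hyphen entity via a word-length counter and emits separating spaces via a pending flag.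
-- intended difference: For a negative max_length on input with any non-whitespace content, A deletes every word (each word becomes the soft-hyphen join of an empty chunk list, leaving only separating spaces), while B returns the whitespace-normalized text unchanged - the intended no-op for a non-positive width. — e.g. on shy("ab", some (-1)): A returns "", B returns "ab"
import Mathlib
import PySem

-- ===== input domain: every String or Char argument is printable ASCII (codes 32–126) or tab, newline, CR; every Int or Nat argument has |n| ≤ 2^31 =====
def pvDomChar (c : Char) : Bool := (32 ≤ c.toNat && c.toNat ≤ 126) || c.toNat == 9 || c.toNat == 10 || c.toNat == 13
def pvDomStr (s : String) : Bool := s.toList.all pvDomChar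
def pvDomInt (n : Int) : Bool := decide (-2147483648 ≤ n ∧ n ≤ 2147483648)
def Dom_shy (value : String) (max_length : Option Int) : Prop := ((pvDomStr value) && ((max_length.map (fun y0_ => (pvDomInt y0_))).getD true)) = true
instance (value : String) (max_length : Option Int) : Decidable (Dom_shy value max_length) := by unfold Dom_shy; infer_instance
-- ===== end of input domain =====

-- B replaces split()+slicing by a single character pass with a word-length counter (objective: alternative, same cost);
-- on a negative max_length A's accidental word-deletion is replaced by the intended no-op (see D_shy).

-- ===== PORT A =====
def shy (value : String) (max_length : Option Int) : String :=
  match max_length with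
  | none => value
  | some m =>
    if m == 0 then value   -- 'if not max_length: return value' (None or 0 are falsy)
    else
      let result : List String :=
        (PySem.Str.split₀ value).foldl (fun result word =>
          if PySem.Str.len word > m then
            let nw := (PySem.List.pyRange 0 (PySem.Str.len word) m).map
              (fun i => PySem.Str.slice word (some i) (some (i + m)))
            result ++ [PySem.Str.join "&shy;" nw]
          else
            result ++ [word]) []
      PySem.Str.join " " result

-- ===== PORT B =====
-- Source B's loop over the characters: cnt = characters of the current word since the last inserted break,
-- pending = a separating space still to emit; output built by recursion instead of out.append.
def shyAltGo (m : Int) : List Char → Int → Bool → List Char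
  | [], _, _ => []
  | c :: rest, cnt, pending =>
    if PySem.Chars.isspace c then
      shyAltGo m rest 0 (pending || decide (0 < cnt))
    else
      (if pending then [' '] else []) ++
      (if cnt == m then "&shy;".toList else []) ++
      c :: shyAltGo m rest (if cnt == m then 1 else cnt + 1) false

def shy_alt (value : String) (max_length : Option Int) : String :=
  match max_length with
  | none => value
  | some m =>
    if m == 0 then value
    else String.ofList (shyAltGo m value.toList 0 false)

-- ===== PRECONDITION & SPEC =====
-- On a negative max_length with any non-whitespace content A deletes every word (each word becomes the
-- soft-hyphen join of an empty chunk list, so only separating spaces survive), while B returns the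
-- whitespace-normalized text unchanged — the intended no-op for a non-positive width.
def D_shy (value : String) (max_length : Option Int) : Prop :=
  max_length.getD 0 < 0 ∧ value.toList.any (fun c => !PySem.Chars.isspace c) = true
instance (value : String) (max_length : Option Int) : Decidable (D_shy value max_length) := by
  unfold D_shy; infer_instance

def Spec_shy (value : String) (max_length : Option Int) (out : String) : Prop :=
  ¬ D_shy value max_length → out = shy_alt value max_length
instance (value : String) (max_length : Option Int) (out : String) : Decidable (Spec_shy value max_length out) := by
  unfold Spec_shy; infer_instance

def pvDiffWitness_shy : String × Option Int := ("ab", some (-1))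
def pvDiffWitnessOut_shy : String × String := ("", "ab")

-- ===== CLAIM (what is proved, stated in full; the proofs are below) =====
def Claim_unchanged_shy : Prop := ∀ (value : String) (max_length : Option Int), Dom_shy value max_length → Spec_shy value max_length (shy value max_length)
def Claim_changed_shy : Prop := Dom_shy (pvDiffWitness_shy.1) (pvDiffWitness_shy.2) ∧ D_shy (pvDiffWitness_shy.1) (pvDiffWitness_shy.2) ∧ shy (pvDiffWitness_shy.1) (pvDiffWitness_shy.2) = pvDiffWitnessOut_shy.1 ∧ shy_alt (pvDiffWitness_shy.1) (pvDiffWitness_shy.2) = pvDiffWitnessOut_shy.2 ∧ pvDiffWitnessOut_shy.1 ≠ pvDiffWitnessOut_shy.2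
def Claim_exact_shy : Prop := ∀ (value : String) (max_length : Option Int), Dom_shy value max_length → D_shy value max_length → shy value max_length ≠ shy_alt value max_length

-- ===== LEMMAS AND PROOFS =====

-- ---- split₀ structure ----

theorem pvGoAcc (r : List Char) : ∀ (cur : List Char) (acc : List (List Char)),
    PySem.Chars.split₀.go r cur acc = acc.reverse ++ PySem.Chars.split₀.go r cur [] := by
  induction r with
  | nil => intro cur acc; by_cases h : cur.isEmpty <;> simp [PySem.Chars.split₀.go, h]
  | cons c r ih =>
    intro cur acc
    by_cases hs : PySem.Chars.isspace c
    · by_cases hc : cur.isEmpty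
      · simp only [PySem.Chars.split₀.go, hs, if_true, hc]
        exact ih [] acc
      · simp only [PySem.Chars.split₀.go, hs, if_true, hc]
        rw [ih [] (cur.reverse :: acc), ih [] [cur.reverse]]
        simp
    · simp only [PySem.Chars.split₀.go, hs]
      exact ih (c :: cur) acc

theorem pvGoWord (r : List Char) : ∀ (cur : List Char) (acc : List (List Char)), cur ≠ [] →
    PySem.Chars.split₀.go r cur acc =
      acc.reverse ++ ((cur.reverse ++ r.takeWhile (fun c => !PySem.Chars.isspace c)) ::
        PySem.Chars.split₀.go (r.dropWhile (fun c => !PySem.Chars.isspace c)) [] []) := by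
  induction r with
  | nil =>
    intro cur acc hcur
    have h : cur.isEmpty = false := by simpa using hcur
    simp [PySem.Chars.split₀.go, h]
  | cons c r ih =>
    intro cur acc hcur
    have h : cur.isEmpty = false := by simpa using hcur
    by_cases hs : PySem.Chars.isspace c
    · simp only [PySem.Chars.split₀.go, hs, if_true, h]
      rw [pvGoAcc r [] (cur.reverse :: acc)]
      simp [hs, PySem.Chars.split₀.go]
    · simp only [PySem.Chars.split₀.go, hs]
      rw [ih (c :: cur) acc (by simp)]
      simp [List.takeWhile, List.dropWhile, hs]

theorem pvSplitNil : PySem.Chars.split₀ [] = [] := by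
  simp [PySem.Chars.split₀, PySem.Chars.split₀.go]

theorem pvSplitSpace (c : Char) (r : List Char) (h : PySem.Chars.isspace c = true) :
    PySem.Chars.split₀ (c :: r) = PySem.Chars.split₀ r := by
  simp [PySem.Chars.split₀, PySem.Chars.split₀.go, h]

theorem pvSplitWord (c : Char) (r : List Char) (h : PySem.Chars.isspace c = false) :
    PySem.Chars.split₀ (c :: r) =
      (c :: r.takeWhile (fun c => !PySem.Chars.isspace c)) ::
        PySem.Chars.split₀ (r.dropWhile (fun c => !PySem.Chars.isspace c)) := by
  show PySem.Chars.split₀.go (c :: r) [] [] = _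
  simp only [PySem.Chars.split₀.go, h, if_false, Bool.false_eq_true]
  rw [pvGoWord r [c] [] (by simp)]
  simp [PySem.Chars.split₀]

theorem pvSplitAllSpace (chars : List Char) (h : ∀ c ∈ chars, PySem.Chars.isspace c = true) :
    PySem.Chars.split₀ chars = [] := by
  induction chars with
  | nil => exact pvSplitNil
  | cons c r ih =>
    rw [pvSplitSpace c r (h c (by simp))]
    exact ih (fun d hd => h d (by simp [hd]))

-- ---- the word emitter (proof-side normal form of one word's output) ----

def emitW (m : Int) : Int → List Char → List Char
  | _, [] => []
  | cnt, c :: t =>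
    (if cnt == m then "&shy;".toList else []) ++ c :: emitW m (if cnt == m then 1 else cnt + 1) t

theorem pvEmitAtM (m : Int) (_hm : 1 ≤ m) (t : List Char) :
    emitW m m t = if t = [] then [] else "&shy;".toList ++ emitW m 0 t := by
  have h0 : ((0:Int) == m) = false := by simp; omega
  cases t with
  | nil => simp [emitW]
  | cons c t => simp [emitW, h0]

theorem pvEmitShort (m : Int) : ∀ (t : List Char) (cnt : Int), 0 ≤ cnt →
    cnt + t.length ≤ m → emitW m cnt t = t := by
  intro t
  induction t with
  | nil => intro cnt _ _; simp [emitW]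
  | cons c t ih =>
    intro cnt h0 hlen
    have hlt : cnt < m := by
      have : (t.length : Int) ≥ 0 := by positivity
      simp at hlen; omega
    have hne : (cnt == m) = false := by simp; omega
    simp only [emitW, hne, if_false, Bool.false_eq_true, List.nil_append]
    rw [ih (cnt + 1) (by omega) (by simp at hlen ⊢; omega)]

theorem pvEmitChunk (m : Int) (_hm : 0 < m) : ∀ (t : List Char) (k : Nat), 1 ≤ k → (k : Int) ≤ m →
    emitW m (m - k) t =
      t.take k ++ (if t.length ≤ k then [] else "&shy;".toList ++ emitW m 0 (t.drop k)) := by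
  intro t
  induction t with
  | nil => intro k _ _; simp [emitW]
  | cons c t ih =>
    intro k hk1 hkm
    have hne : (m - (k:Int) == m) = false := by simp; omega
    simp only [emitW, hne, if_false, Bool.false_eq_true, List.nil_append]
    by_cases hk : k = 1
    · subst hk
      have h1 : m - ((1:Nat):Int) + 1 = m := by omega
      rw [h1, pvEmitAtM m (by omega) t]
      cases t with
      | nil => simp
      | cons d t' => simp [emitW]
    · have hk2 : 2 ≤ k := by omega
      have harith : m - (k:Int) + 1 = m - ((k - 1 : Nat) : Int) := by omega
      have htake : (c :: t).take k = c :: t.take (k-1) := by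
        cases k with
        | zero => omega
        | succ k' => simp
      have hdrop : (c :: t).drop k = t.drop (k-1) := by
        cases k with
        | zero => omega
        | succ k' => simp
      rw [harith, ih (k-1) (by omega) (by omega), htake, hdrop]
      have hiff : t.length + 1 ≤ k ↔ t.length ≤ k - 1 := by omega
      simp only [List.length_cons, hiff, List.cons_append]

-- ---- pyRange chunk recursion ----

theorem pvRangeChunkCons (m : Int) (hm : 0 < m) (len : Int) (hlen : 0 < len) :
    PySem.List.pyRange 0 len m =
      0 :: (PySem.List.pyRange 0 (len - m) m).map (fun i => i + m) := by
  rw [PySem.List.pyRange_of_pos _ _ hm, PySem.List.pyRange_of_pos _ _ hm]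
  simp only [sub_zero]
  have hdiv : (len + m - 1) / m = (len - 1) / m + 1 := by
    have : len + m - 1 = (len - 1) + 1 * m := by ring
    rw [this, Int.add_mul_ediv_right _ _ (by omega : m ≠ 0)]
  have hnn : 0 ≤ (len - 1) / m := Int.ediv_nonneg (by omega) (by omega)
  have hcount : ((len + m - 1) / m).toNat =
      (if 0 < len - m then ((len - m + m - 1) / m).toNat else 0) + 1 := by
    by_cases hlm : 0 < len - m
    · rw [if_pos hlm]
      have : len - m + m - 1 = len - 1 := by ring
      rw [this, hdiv]; omega
    · rw [if_neg hlm]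
      have h01 : (len - 1) / m = 0 := by
        apply Int.ediv_eq_zero_of_lt (by omega) (by omega)
      rw [hdiv, h01]; simp
  rw [if_pos hlen, hcount, List.range_succ_eq_map]
  simp only [List.map_cons, List.map_map]
  congr 1
  · simp
  · apply List.map_congr_left
    intro k _
    simp [Nat.succ_eq_add_one]
    ring

theorem pvRangeNegEmpty (m : Int) (hm : m < 0) (len : Int) (hlen : 0 ≤ len) :
    PySem.List.pyRange 0 len m = [] := by
  simp only [PySem.List.pyRange]
  rw [if_neg (by omega : ¬ m = 0)]
  rw [if_neg (by omega : ¬ 0 < m), if_neg (by omega : ¬ len < 0)]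
  simp

-- intercalate step used everywhere: join sep (a :: l)
theorem pvJoinCons (sep : List Char) (a : List Char) (l : List (List Char)) :
    PySem.Chars.join sep (a :: l) =
      a ++ (if l = [] then [] else sep ++ PySem.Chars.join sep l) := by
  cases l with
  | nil => simp [PySem.Chars.join_singleton]
  | cons b l' => simp [PySem.Chars.join_cons_cons]

theorem pvEmitChunks (m : Int) (hm : 0 < m) : ∀ (n : Nat) (w : List Char), w.length ≤ n →
    emitW m 0 w = PySem.Chars.join "&shy;".toList
      ((PySem.List.pyRange 0 w.length m).map
        (fun i => PySem.List.slice w (some i) (some (i + m)))) := by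
  intro n
  induction n with
  | zero =>
    intro w hw
    have hwnil : w = [] := by cases w with
      | nil => rfl
      | cons c t => simp at hw
    subst hwnil
    rw [PySem.List.pyRange_of_pos _ _ hm]
    simp [emitW, PySem.Chars.join, List.intercalate]
  | succ n ih =>
    intro w hw
    cases w with
    | nil =>
      rw [PySem.List.pyRange_of_pos _ _ hm]
      simp [emitW, PySem.Chars.join, List.intercalate]
    | cons c0 t0 =>
      set w := c0 :: t0 with hwdef
      have hwpos : 0 < w.length := by simp [hwdef]
      have hmnat : 1 ≤ m.toNat := by omega
      have hmcast : ((m.toNat : Int)) = m := Int.toNat_of_nonneg (by omega)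
      -- left side
      have hL := pvEmitChunk m hm w m.toNat hmnat (by omega)
      have hzero : m - (m.toNat : Int) = 0 := by omega
      rw [hzero] at hL
      -- right side range recursion
      rw [pvRangeChunkCons m hm (w.length : Int) (by exact_mod_cast hwpos)]
      rw [List.map_cons, List.map_map, pvJoinCons]
      have hhead : PySem.List.slice w (some 0) (some (0 + m)) = w.take m.toNat := by
        rw [PySem.List.slice_toNat w (by omega) (by omega)]
        simp
      rw [hhead, hL]
      by_cases hle : w.length ≤ m.toNat
      · have hre : PySem.List.pyRange 0 ((w.length : Int) - m) m = [] := by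
          rw [PySem.List.pyRange_of_pos _ _ hm, if_neg (by omega), List.range_zero, List.map_nil]
        rw [hre]
        simp [hle]
      · have hmem : (0:Int) ∈ PySem.List.pyRange 0 ((w.length : Int) - m) m := by
          rw [PySem.List.mem_pyRange_iff_of_pos hm]
          refine ⟨le_refl 0, by omega, by simp⟩
        have hR : PySem.List.pyRange 0 ((w.length : Int) - m) m ≠ [] :=
          List.ne_nil_of_mem hmem
        have hmapne : (PySem.List.pyRange 0 ((w.length : Int) - m) m).map
            ((fun i => PySem.List.slice w (some i) (some (i + m))) ∘ (fun i => i + m)) ≠ [] := by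
          simpa using hR
        rw [if_neg hmapne, if_neg hle]
        have hdl : (w.drop m.toNat).length = w.length - m.toNat := by simp
        have hcast : (((w.drop m.toNat).length : Int)) = (w.length : Int) - m := by
          rw [hdl]; push_cast [Nat.cast_sub (by omega : m.toNat ≤ w.length)]; omega
        have hshift : ∀ i ∈ PySem.List.pyRange 0 ((w.length : Int) - m) m,
            PySem.List.slice w (some (i + m)) (some (i + m + m)) =
              PySem.List.slice (w.drop m.toNat) (some i) (some (i + m)) := by
          intro i hi
          have h0i : 0 ≤ i := ((PySem.List.mem_pyRange_iff_of_pos hm i).1 hi).1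
          rw [PySem.List.slice_toNat _ (by omega) (by omega),
              PySem.List.slice_toNat _ (by omega) (by omega)]
          rw [List.drop_drop]
          congr 1
          · omega
          · congr 1
            omega
        have hmapeq : List.map ((fun i => PySem.List.slice w (some i) (some (i + m))) ∘ fun i => i + m)
              (PySem.List.pyRange 0 ((w.length : Int) - m) m)
            = List.map (fun i => PySem.List.slice (List.drop m.toNat w) (some i) (some (i + m)))
              (PySem.List.pyRange 0 ((w.length : Int) - m) m) := by
          apply List.map_congr_left
          intro i hi
          simp only [Function.comp_apply]
          exact hshift i hi
        rw [hmapeq, ih (w.drop m.toNat) (by rw [hdl]; omega), hcast]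

-- ---- B-side: shyAltGo in terms of split₀ ----

theorem pvMid (m : Int) (hm : 0 < m) : ∀ (t : List Char) (cnt : Int), 1 ≤ cnt → cnt ≤ m →
    shyAltGo m t cnt false =
      emitW m cnt (t.takeWhile (fun c => !PySem.Chars.isspace c)) ++
        shyAltGo m (t.dropWhile (fun c => !PySem.Chars.isspace c)) 0 true := by
  intro t
  induction t with
  | nil => intro cnt _ _; simp [shyAltGo, emitW]
  | cons c t ih =>
    intro cnt h1 h2
    by_cases hs : PySem.Chars.isspace c
    · have hd : decide (0 < cnt) = true := by simp; omega
      simp only [shyAltGo, hs, if_true, Bool.false_or, hd,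
        List.takeWhile, List.dropWhile, Bool.not_true]
      simp [emitW]
    · by_cases hcm : cnt = m
      · subst hcm
        simp only [shyAltGo, hs, if_false, Bool.false_eq_true, beq_self_eq_true, if_true,
          List.takeWhile, List.dropWhile]
        rw [ih 1 (by omega) (by omega)]
        simp [emitW]
      · have hne : (cnt == m) = false := by simp [hcm]
        simp only [shyAltGo, hs, if_false, Bool.false_eq_true, hne,
          List.takeWhile, List.dropWhile]
        rw [ih (cnt + 1) (by omega) (by omega)]
        simp [emitW, hne]

theorem pvKey (m : Int) (hm : 0 < m) : ∀ (n : Nat) (chars : List Char), chars.length ≤ n →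
    ∀ (pending : Bool),
    shyAltGo m chars 0 pending =
      (if pending = true ∧ PySem.Chars.split₀ chars ≠ [] then [' '] else []) ++
        PySem.Chars.join [' '] ((PySem.Chars.split₀ chars).map (emitW m 0)) := by
  intro n
  induction n with
  | zero =>
    intro chars hc pending
    have : chars = [] := by cases chars with
      | nil => rfl
      | cons c t => simp at hc
    subst this
    simp [shyAltGo, pvSplitNil, PySem.Chars.join, List.intercalate]
  | succ n ih =>
    intro chars hc pending
    cases chars with
    | nil => simp [shyAltGo, pvSplitNil, PySem.Chars.join, List.intercalate]
    | cons c rest =>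
      by_cases hs : PySem.Chars.isspace c
      · simp only [shyAltGo, hs, if_true]
        rw [pvSplitSpace c rest hs]
        have : (pending || decide ((0:Int) < 0)) = pending := by simp
        rw [this]
        exact ih rest (by simpa using Nat.lt_succ_iff.mp (by simpa using hc)) pending
      · have h0m : ((0:Int) == m) = false := by simp; omega
        simp only [shyAltGo, hs, if_false, Bool.false_eq_true, h0m]
        simp only [zero_add]
        rw [pvMid m hm rest 1 (le_refl 1) (by omega)]
        have hlen : (rest.dropWhile (fun c => !PySem.Chars.isspace c)).length ≤ n := by
          have h1 : rest.length ≤ n := by simpa using Nat.lt_succ_iff.mp (by simpa using hc)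
          exact le_trans (List.length_dropWhile_le _ _) h1
        rw [ih _ hlen true]
        rw [pvSplitWord c rest (by simpa using hs)]
        rw [List.map_cons, pvJoinCons]
        have hemit : emitW m 0 (c :: rest.takeWhile (fun c => !PySem.Chars.isspace c)) =
            c :: emitW m 1 (rest.takeWhile (fun c => !PySem.Chars.isspace c)) := by
          simp [emitW, h0m]
        rw [hemit]
        by_cases hu : PySem.Chars.split₀ (rest.dropWhile (fun c => !PySem.Chars.isspace c)) = []
        · simp [hu]
        · simp [hu]

-- ---- A-side: the foldl as a map ----

theorem pvFoldlPush {α β : Type} (g : α → β) : ∀ (l : List α) (init : List β),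
    List.foldl (fun r w => r ++ [g w]) init l = init ++ l.map g := by
  intro l
  induction l with
  | nil => intro init; simp
  | cons a l ih => intro init; simp [ih]

theorem pvShyAEq (value : String) (m : Int) (hm0 : (m == 0) = false) :
    shy value (some m) = PySem.Str.join " "
      ((PySem.Str.split₀ value).map (fun word =>
        if PySem.Str.len word > m then
          PySem.Str.join "&shy;" ((PySem.List.pyRange 0 (PySem.Str.len word) m).map
            (fun i => PySem.Str.slice word (some i) (some (i + m))))
        else word)) := by
  show (if m == 0 then value else _) = _
  rw [if_neg (by simp_all)]
  congr 1
  have hfun : (fun (result : List String) (word : String) =>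
      if PySem.Str.len word > m then
        result ++ [PySem.Str.join "&shy;" ((PySem.List.pyRange 0 (PySem.Str.len word) m).map
          (fun i => PySem.Str.slice word (some i) (some (i + m))))]
      else result ++ [word]) =
      (fun result word => result ++ [(fun word =>
        if PySem.Str.len word > m then
          PySem.Str.join "&shy;" ((PySem.List.pyRange 0 (PySem.Str.len word) m).map
            (fun i => PySem.Str.slice word (some i) (some (i + m))))
        else word) word]) := by
    funext r w
    beta_reduce
    split <;> rfl
  rw [hfun, pvFoldlPush]
  simp

theorem pvWordToList (m : Int) (hm : 0 < m) (w : List Char) :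
    ((fun word =>
        if PySem.Str.len word > m then
          PySem.Str.join "&shy;" ((PySem.List.pyRange 0 (PySem.Str.len word) m).map
            (fun i => PySem.Str.slice word (some i) (some (i + m))))
        else word) (String.ofList w)).toList = emitW m 0 w := by
  have hlen : PySem.Str.len (String.ofList w) = (w.length : Int) := by
    simp [PySem.Str.len]
  beta_reduce
  simp only [hlen]
  by_cases hgt : (w.length : Int) > m
  · rw [if_pos hgt]
    rw [PySem.Str.toList_join]
    rw [List.map_map]
    rw [pvEmitChunks m hm w.length w (le_refl _)]
    congr 1
    apply List.map_congr_left
    intro i _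
    simp [PySem.Str.toList_slice, PySem.Chars.slice_eq_listSlice]
  · rw [if_neg hgt]
    rw [pvEmitShort m w 0 (le_refl 0) (by omega)]
    simp

-- ---- negative max_length, all-whitespace input ----

theorem pvGoAllSpace (m : Int) : ∀ (chars : List Char) (pending : Bool),
    (∀ c ∈ chars, PySem.Chars.isspace c = true) → shyAltGo m chars 0 pending = [] := by
  intro chars
  induction chars with
  | nil => intro pending _; simp [shyAltGo]
  | cons c t ih =>
    intro pending h
    simp only [shyAltGo, h c (by simp), if_true]
    exact ih _ (fun d hd => h d (by simp [hd]))

theorem pvJoinAllNil (l : List (List Char)) (h : ∀ x ∈ l, x = ([] : List Char)) :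
    ∀ c ∈ PySem.Chars.join [' '] l, c = ' ' := by
  induction l with
  | nil => simp [PySem.Chars.join, List.intercalate]
  | cons a l ih =>
    rw [pvJoinCons]
    intro c hc
    rw [h a (by simp)] at hc
    by_cases hl : l = []
    · rw [if_pos hl] at hc; simp at hc
    · rw [if_neg hl] at hc
      simp only [List.nil_append] at hc
      rcases List.mem_append.mp hc with h1 | h2
      · simpa using h1
      · exact ih (fun x hx => h x (by simp [hx])) c h2

theorem pvGoKeeps (m : Int) : ∀ (chars : List Char) (cnt : Int) (pending : Bool),
    0 ≤ cnt → (∃ c ∈ chars, PySem.Chars.isspace c = false) →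
    ∃ c ∈ shyAltGo m chars cnt pending, PySem.Chars.isspace c = false := by
  intro chars
  induction chars with
  | nil => intro cnt pending _ h; simp at h
  | cons c t ih =>
    intro cnt pending h0 ⟨d, hd, hds⟩
    by_cases hs : PySem.Chars.isspace c
    · have hdt : d ∈ t := by
        rcases List.mem_cons.mp hd with h | h
        · subst h; rw [hs] at hds; cases hds
        · exact h
      simp only [shyAltGo, hs, if_true]
      exact ih 0 _ (le_refl 0) ⟨d, hdt, hds⟩
    · refine ⟨c, ?_, by simpa using hs⟩
      simp [shyAltGo, hs]

-- ===== VERDICT (by name: the statement is the Claim_ definition above) =====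
theorem shy_spec : Claim_unchanged_shy := by
  intro value max_length _ hnd
  cases max_length with
  | none => rfl
  | some m =>
    by_cases hm0 : m = 0
    · subst hm0; rfl
    rcases lt_trichotomy m 0 with hm | hm | hm
    · -- m < 0 : ¬D forces an all-whitespace value; both sides are ""
      have hall : ∀ c ∈ value.toList, PySem.Chars.isspace c = true := by
        intro c hc
        by_contra hcs
        exact hnd ⟨by simp [hm], List.any_eq_true.mpr ⟨c, hc, by simp [hcs]⟩⟩
      have hsplit : PySem.Chars.split₀ value.toList = [] := pvSplitAllSpace _ hall
      have hA : shy value (some m) = "" := by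
        rw [pvShyAEq value m (by simp [hm0])]
        have : PySem.Str.split₀ value = [] := by
          simp [PySem.Str.split₀, hsplit]
        rw [this]
        simp [PySem.Str.join, PySem.Chars.join, List.intercalate]
      have hB : shy_alt value (some m) = "" := by
        show (if m == 0 then value else _) = _
        rw [if_neg (by simp [hm0])]
        rw [pvGoAllSpace m value.toList false hall]
      rw [hA, hB]
    · omega
    · -- m > 0 : the main equivalence
      rw [pvShyAEq value m (by simp [hm0])]
      show _ = (if m == 0 then value else _)
      rw [if_neg (by simp [hm0])]
      rw [pvKey m hm value.toList.length value.toList (le_refl _) false]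
      simp only [Bool.false_eq_true, false_and, if_false, List.nil_append]
      simp only [PySem.Str.join]
      congr 1
      have hws : PySem.Str.split₀ value = (PySem.Chars.split₀ value.toList).map String.ofList := by
        simp [PySem.Str.split₀]
      rw [hws]
      rw [List.map_map, List.map_map]
      have : " ".toList = [' '] := rfl
      rw [this]
      congr 1
      apply List.map_congr_left
      intro w _
      exact pvWordToList m hm w

theorem shy_changed : Claim_changed_shy := by
  unfold Claim_changed_shy
  decide

theorem shy_tight : Claim_exact_shy := by
  intro value max_length _ hD heq
  cases max_length with
  | none => simp [D_shy] at hD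
  | some m =>
    obtain ⟨hm, hany⟩ := hD
    simp only [Option.getD_some] at hm
    obtain ⟨d, hd, hds⟩ := List.any_eq_true.mp hany
    have hds' : PySem.Chars.isspace d = false := by simpa using hds
    have hm0 : ¬ m = 0 := by omega
    -- B's output keeps a non-whitespace character
    have hBmem : ∃ c ∈ (shy_alt value (some m)).toList, PySem.Chars.isspace c = false := by
      show ∃ c ∈ (if m == 0 then value else String.ofList (shyAltGo m value.toList 0 false)).toList, _
      rw [if_neg (by simp [hm0])]
      simp only [String.toList_ofList]
      exact pvGoKeeps m value.toList 0 false (le_refl 0) ⟨d, hd, hds'⟩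
    -- A's output is whitespace only
    have hAall : ∀ c ∈ (shy value (some m)).toList, c = ' ' := by
      rw [pvShyAEq value m (by simp [hm0])]
      rw [PySem.Str.toList_join]
      have hsp : " ".toList = [' '] := rfl
      rw [hsp]
      apply pvJoinAllNil
      intro x hx
      rw [List.map_map] at hx
      obtain ⟨w, _, hw⟩ := List.mem_map.mp hx
      simp only [Function.comp_apply] at hw
      have hlen : PySem.Str.len w ≥ 0 := by simp [PySem.Str.len]
      have hgt : PySem.Str.len w > m := by omega
      rw [if_pos hgt] at hw
      rw [pvRangeNegEmpty m hm _ (by simp [PySem.Str.len])] at hw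
      simp [PySem.Str.toList_join, PySem.Chars.join] at hw
      exact hw.symm
    obtain ⟨c, hcmem, hcs⟩ := hBmem
    rw [← heq] at hcmem
    have := hAall c hcmem
    subst this
    simp [PySem.Chars.isspace] at hcs
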